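-- pv_equiv track=rewrite | github.com/Ravager6969/Card-Simulator | multithread_client_03.py | change_input_to_string
-- ===== SOURCE A (Python) =====
-- def change_input_to_string(X):
--     if (X=="game has not started yet??????????????"):
--         return "Type \"start\" to close the server and deal cards to all users currently connected. \\n \\n Commands: \\n \\n deal \\n Re-shuffle deck and deal cards to all players \\n \\n transfer (from) (to) (cards) \\n (from) and (to) are integers representing the player number with 1 being at the top and 0 being the pile. (cards) is a set of any number of integers separated by spaces."
--     xXx=""
--     X=X.split(" \\n ")
--     if (X[0]=="green button yellow button red button win lane win game"):
--         X.pop(0)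
--         for x in range(len(X)):
--             X[x]=X[x].split(".")
--             for Xx in range(len(X[x])):
--                 if (x!=0 or Xx!=0):
--                     xXx+=" \\n "
--                 xXx+=X[x][Xx]
--         return xXx
--     return "something went wrong"
-- ===== SOURCE B (Python) =====
-- def change_input_to_string(X):
--     if (X=="game has not started yet??????????????"):
--         return "Type \"start\" to close the server and deal cards to all users currently connected. \\n \\n Commands: \\n \\n deal \\n Re-shuffle deck and deal cards to all players \\n \\n transfer (from) (to) (cards) \\n (from) and (to) are integers representing the player number with 1 being at the top and 0 being the pile. (cards) is a set of any number of integers separated by spaces."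
--     parts = X.split(" \\n ", 1)
--     if parts[0] == "green button yellow button red button win lane win game":
--         return (parts[1] if len(parts) > 1 else "").replace(".", " \\n ")
--     return "something went wrong"
-- ===== Notes on version B (the rewrite author's own statement) =====
-- stated objective: simpler
-- what changed: B replaces A's full separator split, in-place pop, and nested index loops with a manual first-element flag by a single maxsplit-1 split plus one str.replace of the dot by the separator, which is equivalent because the re-join separator equals the split token.
import Mathlib
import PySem

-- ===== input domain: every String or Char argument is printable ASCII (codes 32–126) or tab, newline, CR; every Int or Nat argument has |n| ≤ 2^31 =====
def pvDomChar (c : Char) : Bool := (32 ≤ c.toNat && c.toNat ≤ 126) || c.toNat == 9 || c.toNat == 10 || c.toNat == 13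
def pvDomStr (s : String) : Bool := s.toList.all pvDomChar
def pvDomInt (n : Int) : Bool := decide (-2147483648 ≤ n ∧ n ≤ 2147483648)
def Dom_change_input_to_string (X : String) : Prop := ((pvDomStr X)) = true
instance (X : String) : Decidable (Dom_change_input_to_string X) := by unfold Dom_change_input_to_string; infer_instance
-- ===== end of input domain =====

-- B replaces A's full split / pop / nested index loops with a single maxsplit-1 split and one
-- str.replace, because re-joining with " \\n " after splitting on " \\n " and "." is just
-- replacing "." by " \\n " (objective: simpler).

-- shared string literals of both programs
def pvSep : List Char := " \\n ".toList          -- the 4-char separator: space, backslash, 'n', space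
def pvHeader : List Char := "green button yellow button red button win lane win game".toList
def pvHelp : String := "Type \"start\" to close the server and deal cards to all users currently connected. \\n \\n Commands: \\n \\n deal \\n Re-shuffle deck and deal cards to all players \\n \\n transfer (from) (to) (cards) \\n (from) and (to) are integers representing the player number with 1 being at the top and 0 being the pile. (cards) is a set of any number of integers separated by spaces."

-- ===== PORT A =====
-- X[0] on a split result is safe in Python (split never returns an empty list): headD [] is exact.
def change_input_to_string (X : String) : String :=
  if X = "game has not started yet??????????????" then pvHelp
  else
    let xs := PySem.Chars.splitOn X.toList pvSep
    if xs.headD [] = pvHeader then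
      let rest := xs.tail                       -- X.pop(0)
      String.ofList <|
        rest.zipIdx.foldl (fun xXx px =>
          let segs := PySem.Chars.splitOn px.1 ['.']
          segs.zipIdx.foldl (fun acc sx =>
            (if px.2 ≠ 0 ∨ sx.2 ≠ 0 then acc ++ pvSep else acc) ++ sx.1) xXx) []
    else "something went wrong"

-- ===== PORT B =====
def change_input_to_string_alt (X : String) : String :=
  if X = "game has not started yet??????????????" then pvHelp
  else
    let parts := PySem.Chars.splitOnMax X.toList pvSep 1      -- X.split(" \n ", 1) (sep written escaped)
    if parts.headD [] = pvHeader then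
      String.ofList (PySem.Chars.replace
        (if 1 < parts.length then parts.getD 1 [] else []) ['.'] pvSep)
    else "something went wrong"

-- ===== PRECONDITION & SPEC =====
def Spec_change_input_to_string (X : String) (out : String) : Prop := out = change_input_to_string_alt X
instance (X : String) (out : String) : Decidable (Spec_change_input_to_string X out) := by unfold Spec_change_input_to_string; infer_instance

-- ===== CLAIM (what is proved, stated in full; the proofs are below) =====
def Claim_equal_change_input_to_string : Prop := ∀ (X : String), Dom_change_input_to_string X → Spec_change_input_to_string X (change_input_to_string X)

-- ===== LEMMAS AND PROOFS =====

-- abbreviation used only by the proofs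
def pvF (p : List Char) : List (List Char) := PySem.Chars.splitOn p ['.']

-- basic go step lemmas
theorem go_zero (sep l cur acc) :
    PySem.Chars.splitOn.go sep 0 l cur acc = ((cur.reverse ++ l) :: acc).reverse := by
  rw [PySem.Chars.splitOn.go.eq_def]

theorem go_nil (sep fuel cur acc) :
    PySem.Chars.splitOn.go sep fuel [] cur acc = (cur.reverse :: acc).reverse := by
  rw [PySem.Chars.splitOn.go.eq_def]; cases fuel <;> simp

theorem go_succ (sep fuel c rest cur acc) :
    PySem.Chars.splitOn.go sep (fuel+1) (c :: rest) cur acc =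
      if sep.isPrefixOf (c :: rest) then
        PySem.Chars.splitOn.go sep fuel (List.drop sep.length (c :: rest)) [] (cur.reverse :: acc)
      else PySem.Chars.splitOn.go sep fuel rest (c :: cur) acc := by
  rw [PySem.Chars.splitOn.go.eq_def]

theorem go_ne_nil (sep fuel l cur acc) : PySem.Chars.splitOn.go sep fuel l cur acc ≠ [] := by
  induction fuel generalizing l cur acc with
  | zero => rw [go_zero]; simp
  | succ f ih =>
    cases l with
    | nil => rw [go_nil]; simp
    | cons c rest =>
      rw [go_succ]; split
      · exact ih _ _ _
      · exact ih _ _ _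

-- the accumulator and current-piece prefix factor out
theorem go_acc_cur (sep fuel l cur acc) :
    PySem.Chars.splitOn.go sep fuel l cur acc =
      acc.reverse ++ (cur.reverse ++ (PySem.Chars.splitOn.go sep fuel l [] []).headD []) ::
        (PySem.Chars.splitOn.go sep fuel l [] []).tail := by
  induction fuel generalizing l cur acc with
  | zero => rw [go_zero, go_zero]; simp
  | succ f ih =>
    cases l with
    | nil => rw [go_nil, go_nil]; simp
    | cons c rest =>
      rw [go_succ, go_succ]; split
      · rw [ih (List.drop sep.length (c :: rest)) [] (List.reverse cur :: acc),
            ih (List.drop sep.length (c :: rest)) [] ([List.reverse ([] : List Char)]),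
            ih (List.drop sep.length (c :: rest)) [] ([] : List (List Char))]
        simp
      · rw [ih rest (c :: cur) acc, ih rest [c] ([] : List (List Char)),
            ih rest ([] : List Char) ([] : List (List Char))]
        simp
-- join of a cons as a flatMap
theorem join_cons_flat (sep p ps) :
    PySem.Chars.join sep (p :: ps) = p ++ ps.flatMap (fun q => sep ++ q) := by
  induction ps generalizing p with
  | nil => simp [PySem.Chars.join, List.intercalate]
  | cons q qs ih =>
    have h := ih q
    simp only [PySem.Chars.join, List.intercalate] at *
    simp [List.intersperse] at *
    simp [h]

theorem join_append_flat (sep A B) (hA : A ≠ []) :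
    PySem.Chars.join sep (A ++ B) = PySem.Chars.join sep A ++ B.flatMap (fun q => sep ++ q) := by
  cases A with
  | nil => exact absurd rfl hA
  | cons a as => rw [List.cons_append, join_cons_flat, join_cons_flat]; simp

-- joining the pieces restores the string
theorem join_go (sep) (hsep : sep ≠ []) :
    ∀ fuel l, l.length ≤ fuel →
      PySem.Chars.join sep (PySem.Chars.splitOn.go sep fuel l [] []) = l := by
  intro fuel
  induction fuel with
  | zero =>
    intro l hl
    have : l = [] := List.eq_nil_of_length_eq_zero (Nat.le_zero.mp hl)
    subst this; rw [go_nil]; simp [PySem.Chars.join, List.intercalate]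
  | succ f ih =>
    intro l hl
    cases l with
    | nil => rw [go_nil]; simp [PySem.Chars.join, List.intercalate]
    | cons c rest =>
      rw [go_succ]; split
      · rename_i hpre
        obtain ⟨t, ht⟩ := List.isPrefixOf_iff_prefix.mp hpre
        have hdrop : List.drop sep.length (c :: rest) = t := by
          rw [← ht]; exact List.drop_left
        have hslen : 1 ≤ sep.length := by
          cases sep with
          | nil => exact absurd rfl hsep
          | cons a as => simp
        have htlen : t.length ≤ f := by
          have : (c :: rest).length = sep.length + t.length := by rw [← ht]; simp
          omega
        rw [hdrop, go_acc_cur]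
        cases hG : PySem.Chars.splitOn.go sep f t [] [] with
        | nil => exact absurd hG (go_ne_nil sep f t [] [])
        | cons g gs =>
          have hIH := ih t htlen
          rw [hG] at hIH
          rw [join_cons_flat] at hIH
          simp only [List.reverse_nil, List.reverse_cons, List.nil_append, List.headD_cons,
            List.tail_cons]
          rw [show ([[]] ++ g :: gs : List (List Char)) = ([] : List Char) :: g :: gs from rfl,
            join_cons_flat]
          simp only [List.flatMap_cons, List.nil_append, ← List.append_assoc]
          rw [List.append_assoc sep g, hIH, ht]
      · rename_i hpre
        rw [go_acc_cur]
        cases hG : PySem.Chars.splitOn.go sep f rest [] [] with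
        | nil => exact absurd hG (go_ne_nil sep f rest [] [])
        | cons g gs =>
          have hIH := ih rest (by simpa using Nat.le_of_succ_le_succ hl)
          rw [hG] at hIH
          rw [join_cons_flat] at hIH
          simp only [List.reverse_nil, List.reverse_cons, List.nil_append, List.headD_cons,
            List.tail_cons]
          rw [show (([c] ++ g) :: gs : List (List Char)) = (c :: g) :: gs from by simp]
          rw [join_cons_flat]
          simp [hIH]

-- splitOnMax.go step lemmas
theorem maxgo_zero (sep m l cur acc) :
    PySem.Chars.splitOnMax.go sep 0 m l cur acc = ((cur.reverse ++ l) :: acc).reverse := by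
  rw [PySem.Chars.splitOnMax.go.eq_def]

theorem maxgo_nil (sep fuel m cur acc) :
    PySem.Chars.splitOnMax.go sep fuel m [] cur acc = (cur.reverse :: acc).reverse := by
  rw [PySem.Chars.splitOnMax.go.eq_def]; cases fuel <;> simp

theorem maxgo_succ (sep fuel m c rest cur acc) :
    PySem.Chars.splitOnMax.go sep (fuel+1) m (c :: rest) cur acc =
      if m = 0 then ((cur.reverse ++ (c :: rest)) :: acc).reverse
      else if sep.isPrefixOf (c :: rest) then
        PySem.Chars.splitOnMax.go sep fuel (m-1) (List.drop sep.length (c :: rest)) [] (cur.reverse :: acc)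
      else PySem.Chars.splitOnMax.go sep fuel m rest (c :: cur) acc := by
  rw [PySem.Chars.splitOnMax.go.eq_def]

theorem maxgo_m0 (sep fuel l cur acc) :
    PySem.Chars.splitOnMax.go sep fuel 0 l cur acc = ((cur.reverse ++ l) :: acc).reverse := by
  cases fuel with
  | zero => rw [maxgo_zero]
  | succ f =>
    cases l with
    | nil => rw [maxgo_nil]; simp
    | cons c rest => rw [maxgo_succ]; simp

-- one maxsplit: first raw piece, then the untouched remainder
theorem maxgo_one (sep) (hsep : sep ≠ []) :
    ∀ fuel l cur, l.length ≤ fuel →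
      PySem.Chars.splitOnMax.go sep fuel 1 l cur [] =
        (PySem.Chars.splitOn.go sep fuel l cur []).headD [] ::
          (if (PySem.Chars.splitOn.go sep fuel l cur []).tail = [] then []
           else [PySem.Chars.join sep (PySem.Chars.splitOn.go sep fuel l cur []).tail]) := by
  intro fuel
  induction fuel with
  | zero =>
    intro l cur hl
    have : l = [] := List.eq_nil_of_length_eq_zero (Nat.le_zero.mp hl)
    subst this; rw [maxgo_nil, go_nil]; simp
  | succ f ih =>
    intro l cur hl
    cases l with
    | nil => rw [maxgo_nil, go_nil]; simp
    | cons c rest =>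
      rw [maxgo_succ, go_succ]
      simp only [if_neg (by omega : ¬ (1 : ℕ) = 0)]
      split
      · rename_i hpre
        obtain ⟨t, ht⟩ := List.isPrefixOf_iff_prefix.mp hpre
        have hdrop : List.drop sep.length (c :: rest) = t := by
          rw [← ht]; exact List.drop_left
        have hslen : 1 ≤ sep.length := by
          cases sep with
          | nil => exact absurd rfl hsep
          | cons a as => simp
        have htlen : t.length ≤ f := by
          have : (c :: rest).length = sep.length + t.length := by rw [← ht]; simp
          omega
        rw [hdrop, maxgo_m0, go_acc_cur]
        cases hG : PySem.Chars.splitOn.go sep f t [] [] with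
        | nil => exact absurd hG (go_ne_nil sep f t [] [])
        | cons g gs =>
          have hj : PySem.Chars.join sep (g :: gs) = t := by
            rw [← hG]; exact join_go sep hsep f t htlen
          simp [hj]
      · exact ih rest (c :: cur) (by simpa using Nat.le_of_succ_le_succ hl)

-- replace with a one-char pattern is a character-level flatMap
theorem repgo_nil (old new fuel acc) :
    PySem.Chars.replace.go old new fuel [] acc = acc.reverse := by
  rw [PySem.Chars.replace.go.eq_def]; cases fuel <;> simp

theorem repgo_succ (old new fuel c t acc) :
    PySem.Chars.replace.go old new (fuel+1) (c :: t) acc =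
      if old.isPrefixOf (c :: t) then
        PySem.Chars.replace.go old new fuel (List.drop old.length (c :: t)) (new.reverse ++ acc)
      else PySem.Chars.replace.go old new fuel t (c :: acc) := by
  rw [PySem.Chars.replace.go.eq_def]

theorem repgo_dot (new) :
    ∀ fuel l acc, l.length ≤ fuel →
      PySem.Chars.replace.go ['.'] new fuel l acc =
        acc.reverse ++ l.flatMap (fun c => if c = '.' then new else [c]) := by
  intro fuel
  induction fuel with
  | zero =>
    intro l acc hl
    have : l = [] := List.eq_nil_of_length_eq_zero (Nat.le_zero.mp hl)
    subst this; rw [repgo_nil]; simp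
  | succ f ih =>
    intro l acc hl
    cases l with
    | nil => rw [repgo_nil]; simp
    | cons c t =>
      rw [repgo_succ]
      have hlen : t.length ≤ f := by simpa using Nat.le_of_succ_le_succ hl
      by_cases hc : c = '.'
      · subst hc
        rw [if_pos (by simp [List.isPrefixOf])]
        rw [show List.drop (List.length ['.']) ('.' :: t) = t from by simp]
        rw [ih t _ hlen]
        simp
      · rw [if_neg (by simp [List.isPrefixOf]; exact fun h => hc h.symm)]
        rw [ih t _ hlen]
        simp [hc]

theorem replace_dot (l new) :
    PySem.Chars.replace l ['.'] new = l.flatMap (fun c => if c = '.' then new else [c]) := by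
  rw [PySem.Chars.replace]
  rw [if_neg (by simp)]
  simpa using repgo_dot new l.length l [] (Nat.le_refl _)

-- splitOn on '.' as structural recursion
theorem splitOn_nil_dot : PySem.Chars.splitOn [] ['.'] = [[]] := by
  rw [PySem.Chars.splitOn, go_nil]; rfl

theorem splitOn_cons_dot (c l) :
    PySem.Chars.splitOn (c :: l) ['.'] =
      if c = '.' then [] :: PySem.Chars.splitOn l ['.']
      else (c :: (PySem.Chars.splitOn l ['.']).headD []) :: (PySem.Chars.splitOn l ['.']).tail := by
  rw [PySem.Chars.splitOn, PySem.Chars.splitOn]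
  rw [show (c :: l).length + 1 = l.length + 1 + 1 from by simp]
  rw [go_succ]
  by_cases hc : c = '.'
  · subst hc
    rw [if_pos (by simp [List.isPrefixOf]), if_pos rfl]
    rw [show List.drop (List.length ['.']) ('.' :: l) = l from by simp]
    rw [go_acc_cur]
    cases hG : PySem.Chars.splitOn.go ['.'] (l.length + 1) l [] [] with
    | nil => exact absurd hG (go_ne_nil _ _ _ _ _)
    | cons g gs => simp
  · rw [if_neg (by simp [List.isPrefixOf]; exact fun h => hc h.symm), if_neg hc]
    rw [go_acc_cur]
    simp

theorem splitOn_ne_nil (l sep) : PySem.Chars.splitOn l sep ≠ [] := by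
  rw [PySem.Chars.splitOn]; exact go_ne_nil _ _ _ _ _

-- joining the dot-split with sep = replacing '.' by sep
theorem join_splitOn_dot (sep l) :
    PySem.Chars.join sep (PySem.Chars.splitOn l ['.']) =
      l.flatMap (fun c => if c = '.' then sep else [c]) := by
  induction l with
  | nil => rw [splitOn_nil_dot, join_cons_flat]; simp
  | cons c l ih =>
    rw [splitOn_cons_dot]
    cases hS : PySem.Chars.splitOn l ['.'] with
    | nil => exact absurd hS (splitOn_ne_nil _ _)
    | cons s ss =>
      rw [hS] at ih
      by_cases hc : c = '.'
      · subst hc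
        rw [if_pos rfl, join_cons_flat]
        rw [join_cons_flat] at ih
        simp [← ih]
      · rw [if_neg hc, join_cons_flat]
        rw [join_cons_flat] at ih
        simp [hc, ← ih]

theorem pvSep_ne_nil : pvSep ≠ [] := by decide

theorem pvSep_no_dot :
    pvSep.flatMap (fun c => if c = '.' then pvSep else [c]) = pvSep := by decide

theorem flat_sep_eq_sep_join (sep) (L : List (List Char)) (hL : L ≠ []) :
    L.flatMap (fun s => sep ++ s) = sep ++ PySem.Chars.join sep L := by
  cases L with
  | nil => exact absurd rfl hL
  | cons s ss => rw [List.flatMap_cons, join_cons_flat]; simp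

-- the whole-string replace equals A's join over per-part dot-splits
theorem join_flat (L : List (List Char)) :
    (PySem.Chars.join pvSep L).flatMap (fun c => if c = '.' then pvSep else [c]) =
      PySem.Chars.join pvSep (L.flatMap pvF) := by
  cases L with
  | nil => simp [PySem.Chars.join, List.intercalate]
  | cons p ps =>
    rw [join_cons_flat, List.flatMap_cons, join_append_flat pvSep (pvF p) _ (splitOn_ne_nil _ _)]
    rw [List.flatMap_append, List.flatMap_assoc, List.flatMap_assoc]
    rw [show PySem.Chars.join pvSep (pvF p) = p.flatMap (fun c => if c = '.' then pvSep else [c]) from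
      join_splitOn_dot pvSep p]
    congr 1
    congr 1
    funext q
    rw [List.flatMap_append, pvSep_no_dot,
      show (q.flatMap fun c => if c = '.' then pvSep else [c]) = PySem.Chars.join pvSep (pvF q) from
        (join_splitOn_dot pvSep q).symm,
      flat_sep_eq_sep_join pvSep (pvF q) (splitOn_ne_nil _ _)]

-- A's inner loop, when a separator precedes every segment
theorem inner_fold (x : Nat) (segs : List (List Char)) :
    ∀ (k : Nat) (acc : List Char), (x ≠ 0 ∨ k ≠ 0) →
      (segs.zipIdx k).foldl (fun acc sx =>
          (if x ≠ 0 ∨ sx.2 ≠ 0 then acc ++ pvSep else acc) ++ sx.1) acc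
        = acc ++ segs.flatMap (fun s => pvSep ++ s) := by
  induction segs with
  | nil => intro k acc h; simp
  | cons s ss ih =>
    intro k acc h
    rw [List.zipIdx_cons, List.foldl_cons]
    rw [if_pos (by omega : x ≠ 0 ∨ k ≠ 0)]
    rw [ih (k+1) _ (Or.inr (by omega))]
    simp

-- A's inner loop on the first part: no separator before the very first segment
theorem inner_fold_zero (p : List Char) (acc : List Char) :
    ((pvF p).zipIdx).foldl (fun acc sx =>
        (if (0 : Nat) ≠ 0 ∨ sx.2 ≠ 0 then acc ++ pvSep else acc) ++ sx.1) acc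
      = acc ++ PySem.Chars.join pvSep (pvF p) := by
  cases hS : pvF p with
  | nil => exact absurd hS (splitOn_ne_nil _ _)
  | cons s ss =>
    rw [List.zipIdx_cons, List.foldl_cons]
    rw [if_neg (by omega : ¬ ((0 : Nat) ≠ 0 ∨ (0 : Nat) ≠ 0))]
    rw [inner_fold 0 ss 1 _ (Or.inr (by omega))]
    rw [join_cons_flat]
    simp

-- A's outer loop over the later parts
theorem outer_fold (parts : List (List Char)) :
    ∀ (k : Nat) (acc : List Char), k ≠ 0 →
      (parts.zipIdx k).foldl (fun xXx px =>
          ((pvF px.1).zipIdx).foldl (fun acc sx =>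
            (if px.2 ≠ 0 ∨ sx.2 ≠ 0 then acc ++ pvSep else acc) ++ sx.1) xXx) acc
        = acc ++ parts.flatMap (fun p => (pvF p).flatMap (fun s => pvSep ++ s)) := by
  induction parts with
  | nil => intro k acc hk; simp
  | cons p ps ih =>
    intro k acc hk
    rw [List.zipIdx_cons, List.foldl_cons]
    rw [inner_fold k (pvF p) 0 acc (Or.inl hk)]
    rw [ih (k+1) _ (by omega)]
    simp

-- A's whole nested loop in closed form
theorem loopA (rest : List (List Char)) :
    rest.zipIdx.foldl (fun xXx px =>
        ((pvF px.1).zipIdx).foldl (fun acc sx =>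
          (if px.2 ≠ 0 ∨ sx.2 ≠ 0 then acc ++ pvSep else acc) ++ sx.1) xXx) []
      = PySem.Chars.join pvSep (rest.flatMap pvF) := by
  cases rest with
  | nil => simp [PySem.Chars.join, List.intercalate]
  | cons r rs =>
    rw [List.zipIdx_cons, List.foldl_cons]
    rw [show (0 : Nat) = 0 from rfl]
    rw [inner_fold_zero r []]
    rw [outer_fold rs 1 _ (by omega)]
    rw [List.flatMap_cons, join_append_flat pvSep (pvF r) _ (splitOn_ne_nil _ _),
      List.flatMap_assoc]
    simp

-- the two programs agree
theorem ports_agree (X : String) :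
    change_input_to_string X = change_input_to_string_alt X := by
  rw [change_input_to_string, change_input_to_string_alt]
  by_cases hM : X = "game has not started yet??????????????"
  · rw [if_pos hM, if_pos hM]
  · rw [if_neg hM, if_neg hM]
    have hmax : PySem.Chars.splitOnMax X.toList pvSep 1 =
        (PySem.Chars.splitOn.go pvSep (X.toList.length + 1) X.toList [] []).headD [] ::
          (if (PySem.Chars.splitOn.go pvSep (X.toList.length + 1) X.toList [] []).tail = [] then []
           else [PySem.Chars.join pvSep
              (PySem.Chars.splitOn.go pvSep (X.toList.length + 1) X.toList [] []).tail]) := by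
      rw [PySem.Chars.splitOnMax, if_neg (by omega : ¬ (1 : ℤ) < 0)]
      rw [show (1 : ℤ).toNat = 1 from rfl]
      exact maxgo_one pvSep pvSep_ne_nil (X.toList.length + 1) X.toList [] (by omega)
    have hS : PySem.Chars.splitOn X.toList pvSep =
        PySem.Chars.splitOn.go pvSep (X.toList.length + 1) X.toList [] [] := by
      rw [PySem.Chars.splitOn]
    rw [hmax, hS]
    cases hT : (PySem.Chars.splitOn.go pvSep (X.toList.length + 1) X.toList [] []).tail with
    | nil =>
      simp only [hT, List.headD_cons]
      split
      · simp [replace_dot]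
      · rfl
    | cons t ts =>
      simp only [hT, List.headD_cons, if_neg (by simp : ¬ (t :: ts = []))]
      split
      · have hA := loopA (t :: ts)
        simp only [pvF] at hA
        rw [hA]
        simp only [List.length_cons, List.length_nil]
        rw [if_pos (by omega : 1 < 0 + 1 + 1)]
        rw [show List.getD [(PySem.Chars.splitOn.go pvSep (X.toList.length + 1)
            X.toList [] []).headD [], PySem.Chars.join pvSep (t :: ts)] 1 [] =
          PySem.Chars.join pvSep (t :: ts) from by simp [List.getD]]
        rw [replace_dot, join_flat]
      · rfl

-- ===== VERDICT =====
theorem change_input_to_string_spec : Claim_equal_change_input_to_string := by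
  intro X _
  unfold Spec_change_input_to_string
  exact ports_agree X
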